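-- pv_equiv track=rewrite | github.com/adamjankaczmarek/poleval2020 | utils/polish_text_to_phonemes.py | wsteczne
-- ===== SOURCE A (Python) =====
-- Vowels = set("aiouey") | set(["on", "en"])
--
-- Dzwieczne = {
--     "w": "f", "d": "t", "drz": "cz", "rz": "sz", "dzi": "ci", "dz": "c", "b": "p", "z": "s", "g": "k", "zi": "si",
--     'gi': 'ki'
-- }
--
-- Bezdzwieczne = {
--     "f": "w", "t": "d", "cz": "drz", "sz": "rz", "ci": "dzi", "c": "dz", "p": "b", "s": "z", "k": "g", "si": "zi",
--     "ch": "ch", 'ki': 'gi'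
-- }
--
-- def swap(g,D):
--   if D == "D":
--     if g in Bezdzwieczne:
--        return Bezdzwieczne[g]
--   else:
--     if g in Dzwieczne:
--        return Dzwieczne[g]
--   return g
--
-- def wsteczne(L):
--   L = L[:]
--   i = len(L) - 1
--   Last = "?"
--   while i>=0:
--     if Last == "?":
--       if L[i] in Dzwieczne:
--         Last= "D"
--       elif L[i] in Bezdzwieczne:
--         Last = "B"
--     if L[i] in Vowels:
--        Last = "?"
--     if Last != "?":
--        L[i] = swap(L[i],Last)
--     i -= 1
--   return L
-- ===== SOURCE B (Python) =====
-- Vowels = set("aiouey") | set(["on", "en"])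
--
-- Dzwieczne = {
--     "w": "f", "d": "t", "drz": "cz", "rz": "sz", "dzi": "ci", "dz": "c", "b": "p", "z": "s", "g": "k", "zi": "si",
--     'gi': 'ki'
-- }
--
-- Bezdzwieczne = {
--     "f": "w", "t": "d", "cz": "drz", "sz": "rz", "ci": "dzi", "c": "dz", "p": "b", "s": "z", "k": "g", "si": "zi",
--     "ch": "ch", 'ki': 'gi'
-- }
--
-- def _assim_rev(r):
--     # r is a reversed cluster of non-vowel tokens: scan for the first (i.e. the
--     # rightmost in the original order) token that is a dict key; it fixes the
--     # voicing for every token after it (to its left originally); tokens before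
--     # it pass through unchanged.
--     out = []
--     for i, g in enumerate(r):
--         if g in Dzwieczne:
--             return out + [g] + [Bezdzwieczne.get(x, x) for x in r[i + 1:]]
--         if g in Bezdzwieczne:
--             return out + [g] + [Dzwieczne.get(x, x) for x in r[i + 1:]]
--         out.append(g)
--     return out
--
-- def _assim(c):
--     return _assim_rev(c[::-1])[::-1]
--
-- def wsteczne(L):
--     res = []
--     cluster = []
--     for g in L:
--         if g in Vowels:
--             res.extend(_assim(cluster))
--             res.append(g)
--             cluster = []
--         else:
--             cluster.append(g)
--     res.extend(_assim(cluster))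
--     return res
-- ===== Notes on version B (the rewrite author's own statement) =====
-- stated objective: alternative
-- what changed: B replaces A's single right-to-left index loop with a mutable voicing-state variable by a forward pass that splits the list into vowel-separated consonant clusters and fixes each cluster independently: the rightmost dict-key token of a cluster determines the voicing applied to everything left of it.
import Mathlib
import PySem

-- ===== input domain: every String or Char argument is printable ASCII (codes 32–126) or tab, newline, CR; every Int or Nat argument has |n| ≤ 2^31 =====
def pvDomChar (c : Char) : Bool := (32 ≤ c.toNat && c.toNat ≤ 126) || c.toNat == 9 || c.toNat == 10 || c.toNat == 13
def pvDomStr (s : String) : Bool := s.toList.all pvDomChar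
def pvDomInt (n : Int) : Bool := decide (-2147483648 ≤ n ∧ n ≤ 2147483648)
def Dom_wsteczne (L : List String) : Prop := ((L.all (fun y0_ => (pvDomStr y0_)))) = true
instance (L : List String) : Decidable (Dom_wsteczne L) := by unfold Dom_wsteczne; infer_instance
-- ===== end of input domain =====

-- B re-implements the same backward voicing assimilation by decomposing the list into
-- vowel-separated consonant clusters and fixing each cluster independently (objective:
-- alternative decomposition, same cost); A and B agree on every input.

-- ===== PORT A =====
-- module constants
def pvVowels : List String := ["a", "i", "o", "u", "e", "y", "on", "en"]   -- set("aiouey") | {"on","en"}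
def pvDzw : PySem.Dict String String := PySem.Dict.ofList
  [("w","f"),("d","t"),("drz","cz"),("rz","sz"),("dzi","ci"),("dz","c"),("b","p"),("z","s"),("g","k"),("zi","si"),("gi","ki")]
def pvBez : PySem.Dict String String := PySem.Dict.ofList
  [("f","w"),("t","d"),("cz","drz"),("sz","rz"),("ci","dzi"),("c","dz"),("p","b"),("s","z"),("k","g"),("si","zi"),("ch","ch"),("ki","gi")]

def pvSwap (g D : String) : String :=
  if D == "D" then
    if pvBez.contains g then (pvBez.get? g).getD g else g
  else
    if pvDzw.contains g then (pvDzw.get? g).getD g else g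

-- the while loop: fuel k+1 means the current index is i = k; i is always in range,
-- so L[i] is read with getD and written with List.set
def pvLoopA (fuel : Nat) (L : List String) (last : String) : List String :=
  match fuel with
  | 0 => L
  | k+1 =>
    let g := L.getD k ""
    let last := if last == "?" then
                  (if pvDzw.contains g then "D" else if pvBez.contains g then "B" else last)
                else last
    let last := if pvVowels.contains g then "?" else last
    let L := if last != "?" then L.set k (pvSwap g last) else L
    pvLoopA k L last

def wsteczne (L : List String) : List String := pvLoopA L.length L "?"

-- ===== PORT B =====
def pvGet (m : PySem.Dict String String) (x : String) : String := m.getD x x   -- m.get(x, x)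

def pvAssimRev : List String → List String
  | [] => []
  | g :: r =>
    if pvDzw.contains g then g :: r.map (pvGet pvBez)
    else if pvBez.contains g then g :: r.map (pvGet pvDzw)
    else g :: pvAssimRev r

def pvAssim (c : List String) : List String := (pvAssimRev c.reverse).reverse

def wsteczne_alt (L : List String) : List String :=
  let p := L.foldl (fun (rc : List String × List String) g =>
      if pvVowels.contains g then (rc.1 ++ pvAssim rc.2 ++ [g], ([] : List String))
      else (rc.1, rc.2 ++ [g])) ([], [])
  p.1 ++ pvAssim p.2

-- ===== PRECONDITION & SPEC =====
def Spec_wsteczne (L : List String) (out : List String) : Prop := out = wsteczne_alt L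
instance (L : List String) (out : List String) : Decidable (Spec_wsteczne L out) := by unfold Spec_wsteczne; infer_instance

-- ===== CLAIM (what is proved, stated in full; the proofs are below) =====
def Claim_equal_wsteczne : Prop := ∀ (L : List String), Dom_wsteczne L → Spec_wsteczne L (wsteczne L)

-- ===== LEMMAS AND PROOFS =====

-- A's loop, rephrased as a structural recursion over the REVERSED list with the same state
def pvRevA : List String → String → List String
  | [], _ => []
  | g :: r, last =>
    let l1 := if last == "?" then
                (if pvDzw.contains g then "D" else if pvBez.contains g then "B" else last)
              else last
    let l2 := if pvVowels.contains g then "?" else l1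
    let g' := if l2 != "?" then pvSwap g l2 else g
    g' :: pvRevA r l2

-- key-set disjointness facts
lemma pv_dzw_not_bez {g : String} (h : pvDzw.contains g = true) : pvBez.contains g = false := by
  rw [PySem.Dict.contains_iff_mem_keys] at h
  have e : pvDzw.keys = ["w","d","drz","rz","dzi","dz","b","z","g","zi","gi"] := by decide
  rw [e] at h; simp at h
  rcases h with h|h|h|h|h|h|h|h|h|h|h <;> subst h <;> decide

lemma pv_bez_not_dzw {g : String} (h : pvBez.contains g = true) : pvDzw.contains g = false := by
  rw [PySem.Dict.contains_iff_mem_keys] at h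
  have e : pvBez.keys = ["f","t","cz","sz","ci","c","p","s","k","si","ch","ki"] := by decide
  rw [e] at h; simp at h
  rcases h with h|h|h|h|h|h|h|h|h|h|h|h <;> subst h <;> decide

-- A's swap with a fixed voicing is exactly B's dict.get(x, x)
lemma pv_swap_D (x : String) : pvSwap x "D" = pvGet pvBez x := by
  unfold pvSwap pvGet
  rw [PySem.Dict.getD_eq_get?_getD]
  by_cases h : pvBez.contains x = true
  · rw [if_pos (show ((("D" : String) == "D") = true) by decide), if_pos h]
  · rw [(PySem.Dict.get?_eq_none_iff_contains pvBez x).mpr (by simpa using h)]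
    rw [if_pos (show ((("D" : String) == "D") = true) by decide)]
    rw [if_neg h]
    rfl

lemma pv_swap_B (x : String) : pvSwap x "B" = pvGet pvDzw x := by
  unfold pvSwap pvGet
  rw [PySem.Dict.getD_eq_get?_getD]
  by_cases h : pvDzw.contains x = true
  · rw [if_neg (show ¬((("B" : String) == "D") = true) by decide), if_pos h]
  · rw [(PySem.Dict.get?_eq_none_iff_contains pvDzw x).mpr (by simpa using h)]
    rw [if_neg (show ¬((("B" : String) == "D") = true) by decide)]
    rw [if_neg h]
    rfl

-- Step 1: A's index-decrementing, in-place loop equals pvRevA on the reversed list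
lemma pv_loop_eq (k : Nat) : ∀ (L : List String) (last : String), k ≤ L.length →
    pvLoopA k L last = (pvRevA (L.take k).reverse last).reverse ++ L.drop k := by
  induction k with
  | zero => intro L last _; simp [pvLoopA, pvRevA]
  | succ k ih =>
    intro L last hk
    have hk' : k < L.length := hk
    have hget : L.getD k "" = L[k] := by
      simp [List.getD_eq_getElem?_getD, hk']
    have htake : (L.take (k+1)).reverse = L[k] :: (L.take k).reverse := by
      rw [List.take_add_one, List.getElem?_eq_getElem hk']; simp
    rw [pvLoopA, hget, htake, pvRevA]
    set l1 := if last == "?" then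
                (if pvDzw.contains L[k] then "D" else if pvBez.contains L[k] then "B" else last)
              else last with hl1
    set l2 := if pvVowels.contains L[k] then "?" else l1 with hl2
    by_cases h2 : (l2 != "?") = true
    · rw [if_pos h2, if_pos h2]
      rw [ih _ _ (by simpa using Nat.le_of_lt hk')]
      have ht : (L.set k (pvSwap L[k] l2)).take k = L.take k := by
        apply List.ext_getElem <;> simp [List.getElem_set]
        intro i h1 _ e; omega
      have hd : (L.set k (pvSwap L[k] l2)).drop k = pvSwap L[k] l2 :: L.drop (k+1) := by
        rw [List.drop_eq_getElem_cons (by simpa), List.getElem_set_self]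
        rw [List.drop_set_of_lt (hnm := by omega)]
      rw [ht, hd]; simp
    · simp only [if_neg h2]
      rw [ih _ _ (Nat.le_of_lt hk')]
      rw [List.drop_eq_getElem_cons hk']
      simp

-- Step 2: a vowel resets the state and passes through unchanged
lemma pv_revA_vowel {g : String} (hv : pvVowels.contains g = true) :
    ∀ (r : List String) (s : List String) (last : String),
      pvRevA (r ++ g :: s) last = pvRevA r last ++ g :: pvRevA s "?" := by
  intro r
  induction r with
  | nil =>
    intro s last
    simp only [List.nil_append, pvRevA]
    rw [if_pos hv]
    simp
  | cons x r ih =>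
    intro s last
    simp only [List.cons_append, pvRevA]
    rw [ih]

-- Step 3: with the voicing fixed (state ≠ "?"), A just maps swap over vowel-free tokens
lemma pv_revA_const (l : String) (hl : (l == "?") = false) :
    ∀ r : List String, (∀ g ∈ r, pvVowels.contains g = false) →
      pvRevA r l = r.map (fun g => pvSwap g l) := by
  intro r
  induction r with
  | nil => intro _; simp [pvRevA]
  | cons g r ih =>
    intro h
    have hg : pvVowels.contains g = false := h g (by simp)
    simp only [pvRevA, List.map_cons]
    rw [if_neg (show ¬((l == "?") = true) by simp [hl])]
    rw [if_neg (show ¬(pvVowels.contains g = true) by simp only [hg]; exact Bool.false_ne_true)]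
    rw [if_pos (show ((l != "?") = true) by simp [bne, hl])]
    rw [ih (fun x hx => h x (by simp [hx]))]

-- Step 4: on a vowel-free reversed cluster, B's pvAssimRev is exactly pvRevA from "?"
lemma pv_assimRev_eq : ∀ r : List String, (∀ g ∈ r, pvVowels.contains g = false) →
    pvAssimRev r = pvRevA r "?" := by
  intro r
  induction r with
  | nil => intro _; rfl
  | cons g r ih =>
    intro h
    have hg : pvVowels.contains g = false := h g (by simp)
    have hr : ∀ x ∈ r, pvVowels.contains x = false := fun x hx => h x (by simp [hx])
    simp only [pvAssimRev, pvRevA]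
    rw [if_pos (show ((("?" : String) == "?") = true) by decide)]
    rw [if_neg (show ¬(pvVowels.contains g = true) by simp only [hg]; exact Bool.false_ne_true)]
    by_cases hD : pvDzw.contains g = true
    · have hB := pv_dzw_not_bez hD
      rw [if_pos hD, if_pos hD]
      rw [if_pos (show ((("D" : String) != "?") = true) by decide)]
      rw [pv_revA_const "D" (by decide) r hr]
      have hsw : pvSwap g "D" = g := by
        unfold pvSwap
        rw [if_pos (show ((("D" : String) == "D") = true) by decide)]
        rw [if_neg (show ¬(pvBez.contains g = true) by simp [hB])]
      rw [hsw]
      simp [pv_swap_D]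
    · by_cases hB : pvBez.contains g = true
      · rw [if_neg hD, if_neg hD, if_pos hB, if_pos hB]
        rw [if_pos (show ((("B" : String) != "?") = true) by decide)]
        rw [pv_revA_const "B" (by decide) r hr]
        have hsw : pvSwap g "B" = g := by
          unfold pvSwap
          rw [if_neg (show ¬((("B" : String) == "D") = true) by decide)]
          rw [if_neg (show ¬(pvDzw.contains g = true) by simp [pv_bez_not_dzw hB])]
        rw [hsw]
        simp [pv_swap_B]
      · rw [if_neg hD, if_neg hD, if_neg hB, if_neg hB]
        rw [if_neg (show ¬((("?" : String) != "?") = true) by decide)]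
        rw [ih hr]

-- Step 5: B's fold, characterised recursively
def pvF : List String → List String → List String
  | c, [] => pvAssim c
  | c, g :: t => if pvVowels.contains g then pvAssim c ++ g :: pvF [] t else pvF (c ++ [g]) t
  termination_by _ t => t.length

lemma pv_foldl_eq : ∀ (t res c : List String),
    (let p := t.foldl (fun (rc : List String × List String) g =>
        if pvVowels.contains g then (rc.1 ++ pvAssim rc.2 ++ [g], ([] : List String))
        else (rc.1, rc.2 ++ [g])) (res, c)
     p.1 ++ pvAssim p.2) = res ++ pvF c t := by
  intro t
  induction t with
  | nil => intro res c; simp [pvF]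
  | cons g t ih =>
    intro res c
    simp only [List.foldl_cons, pvF]
    by_cases hv : pvVowels.contains g = true
    · rw [if_pos hv, if_pos hv, ih]; simp
    · rw [if_neg (by simpa using hv), if_neg (by simpa using hv), ih]

-- Step 6: pvF computes pvRevA of the reversed remaining input (cluster pending)
lemma pv_F_eq : ∀ (t c : List String), (∀ g ∈ c, pvVowels.contains g = false) →
    pvF c t = (pvRevA (t.reverse ++ c.reverse) "?").reverse := by
  intro t
  induction t with
  | nil =>
    intro c hc
    have : ∀ g ∈ c.reverse, pvVowels.contains g = false := by simpa using hc
    simp [pvF, pvAssim, pv_assimRev_eq c.reverse this]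
  | cons g t ih =>
    intro c hc
    by_cases hv : pvVowels.contains g = true
    · rw [pvF, if_pos hv]
      have e : (g :: t).reverse ++ c.reverse = t.reverse ++ g :: c.reverse := by simp
      rw [e, pv_revA_vowel hv]
      have hcr : ∀ x ∈ c.reverse, pvVowels.contains x = false := by simpa using hc
      rw [ih [] (by simp)]
      simp [pvAssim, pv_assimRev_eq c.reverse hcr]
    · rw [pvF, if_neg (by simpa using hv)]
      rw [ih (c ++ [g]) (by
        intro x hx
        rcases List.mem_append.mp hx with h | h
        · exact hc x h
        · simp at h; subst h; simpa using hv)]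
      congr 1
      simp

-- ===== VERDICT (by name: the statement is the Claim_ definition above) =====
theorem wsteczne_spec : Claim_equal_wsteczne := by
  intro L _
  unfold Spec_wsteczne wsteczne wsteczne_alt
  rw [pv_loop_eq L.length L "?" (le_refl _)]
  rw [pv_foldl_eq L [] []]
  rw [pv_F_eq L [] (by simp)]
  simp
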